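-- pv_equiv track=rewrite | github.com/KuangDW/CoachAI-Plus | Shot_Evaluation/Utils/Dataprocess.py | count_rally_lengths
-- ===== SOURCE A (Python) =====
-- def count_rally_lengths(rallies):
--     """ Count the lengths of consecutive rally numbers and return a dictionary with the length as the key and count as the value. """
--     lengths_dict = {}
--     current_rally = rallies[0]
--     length = 0
--
--     for rally in rallies:
--         if rally == current_rally:
--             length += 1
--         else:
--             if length in lengths_dict:
--                 lengths_dict[length] += 1
--             else:
--                 lengths_dict[length] = 1
--             current_rally = rally
--             length = 1
--
--     # Add the last sequence
--     if length in lengths_dict: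
--         lengths_dict[length] += 1
--     else:
--         lengths_dict[length] = 1
--
--     return lengths_dict
-- ===== SOURCE B (Python) =====
-- def count_rally_lengths(rallies):
--     """Consume the list run by run: measure the leading run with an inner scan,
--     tally its length, slice it off, repeat. Returns {} on the empty list (A raises)."""
--     counts = {}
--     rest = rallies
--     while rest:
--         head = rest[0]
--         k = 0
--         while k < len(rest) and rest[k] == head:
--             k += 1
--         counts[k] = counts.get(k, 0) + 1
--         rest = rest[k:]
--     return counts
-- ===== Notes on version B (the rewrite author's own statement) =====
-- stated objective: alternative
-- what changed: B repeatedly consumes the leading run of the list (an inner scan measures the run, its length is tallied, the run is sliced off) instead of A's single pass that threads current_rally/length state across the whole list and closes runs inside the loop body.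
import Mathlib
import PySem

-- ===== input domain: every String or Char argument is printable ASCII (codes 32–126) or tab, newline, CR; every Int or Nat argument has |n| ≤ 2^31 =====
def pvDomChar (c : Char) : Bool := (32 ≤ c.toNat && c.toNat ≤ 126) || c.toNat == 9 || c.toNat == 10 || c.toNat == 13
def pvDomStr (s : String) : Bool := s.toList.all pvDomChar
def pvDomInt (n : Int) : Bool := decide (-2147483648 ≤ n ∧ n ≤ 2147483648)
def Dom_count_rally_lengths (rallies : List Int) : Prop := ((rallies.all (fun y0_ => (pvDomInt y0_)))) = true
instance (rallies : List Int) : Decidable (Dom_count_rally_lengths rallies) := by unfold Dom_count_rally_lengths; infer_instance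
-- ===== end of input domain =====

-- B consumes the list run by run (scan the leading run, tally its length, slice it off)
-- instead of A's single pass threading current_rally/length state; return values agree on nonempty lists.

-- ===== PORT A =====
-- A's loop body: extend the tracked run, or push the finished run's length into the dict.
def pvStepA (st : PySem.Dict Int Int × Int × Int) (rally : Int) : PySem.Dict Int Int × Int × Int :=
  let (lengths_dict, current_rally, length) := st
  if rally == current_rally then
    (lengths_dict, current_rally, length + 1)
  else
    let lengths_dict :=
      if lengths_dict.contains length then
        lengths_dict.insert length (lengths_dict.getD length 0 + 1)
      else
        lengths_dict.insert length 1
    (lengths_dict, rally, 1)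

def count_rally_lengths (rallies : List Int) : List (Int × Int) :=
  match PySem.List.pyGet? rallies 0 with
  | none => []   -- rallies[0] raises IndexError; excluded by Pre_
  | some current_rally0 =>
    let st := rallies.foldl pvStepA (PySem.Dict.empty, current_rally0, 0)
    let lengths_dict := st.1
    let length := st.2.2
    let lengths_dict :=
      if lengths_dict.contains length then
        lengths_dict.insert length (lengths_dict.getD length 0 + 1)
      else
        lengths_dict.insert length 1
    lengths_dict.items

-- ===== PORT B =====
-- B's inner while 'k = 0; while k < len(rest) and rest[k] == head: k += 1' scans the
-- leading prefix equal to head; ported as the structural scan of that same prefix.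
def pvRunLen (head : Int) : List Int → Int
  | [] => 0
  | x :: t => if x == head then 1 + pvRunLen head t else 0

-- B's outer while loop: tally the leading run's length, drop it (rest = rest[k:]), repeat.
-- Fuel (= list length, enough since each step removes at least one element) only makes the
-- same computation a structural recursion; it never changes the result.
def pvConsumeF : Nat → List Int → PySem.Dict Int Int → PySem.Dict Int Int
  | 0, _, counts => counts
  | _, [], counts => counts
  | n + 1, h :: t, counts =>
    let k := pvRunLen h (h :: t)
    pvConsumeF n (PySem.List.slice (h :: t) (some k) none)
      (counts.insert k (counts.getD k 0 + 1))

def count_rally_lengths_alt (rallies : List Int) : List (Int × Int) :=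
  (pvConsumeF rallies.length rallies PySem.Dict.empty).items

-- ===== PRECONDITION & SPEC =====
-- A raises IndexError on the empty list (rallies[0]); Pre_ excludes exactly that input.
def Pre_count_rally_lengths (rallies : List Int) : Prop := rallies ≠ []
instance (rallies : List Int) : Decidable (Pre_count_rally_lengths rallies) := by unfold Pre_count_rally_lengths; infer_instance
def pvWitness_count_rally_lengths : List Int := [7, 7, 3, 7]

def Spec_count_rally_lengths (rallies : List Int) (out : List (Int × Int)) : Prop := out = count_rally_lengths_alt rallies
instance (rallies : List Int) (out : List (Int × Int)) : Decidable (Spec_count_rally_lengths rallies out) := by unfold Spec_count_rally_lengths; infer_instance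

-- ===== CLAIM (what is proved, stated in full; the proofs are below) =====
def Claim_equal_count_rally_lengths : Prop := ∀ (rallies : List Int), Dom_count_rally_lengths rallies → Pre_count_rally_lengths rallies → Spec_count_rally_lengths rallies (count_rally_lengths rallies)

-- ===== LEMMAS AND PROOFS =====

lemma pvRunLen_nonneg (head : Int) : ∀ (xs : List Int), 0 ≤ pvRunLen head xs := by
  intro xs
  induction xs with
  | nil => simp [pvRunLen]
  | cons x t ih => simp only [pvRunLen]; split_ifs <;> omega

-- the tally both programs apply to a finished run's length
def pvTally (d : PySem.Dict Int Int) (r : Int) : PySem.Dict Int Int := d.insert r (d.getD r 0 + 1)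

lemma pvPush_eq (d : PySem.Dict Int Int) (l : Int) :
    (if d.contains l then d.insert l (d.getD l 0 + 1) else d.insert l 1) = pvTally d l := by
  unfold pvTally
  split_ifs with h
  · rfl
  · rw [PySem.Dict.getD_of_not_contains (h := by simpa using h)]
    norm_num

lemma pvConsumeF_nil (n : Nat) (d : PySem.Dict Int Int) : pvConsumeF n [] d = d := by
  cases n <;> simp [pvConsumeF]

lemma pvConsumeF_cons (n : Nat) (h : Int) (t : List Int) (d : PySem.Dict Int Int) :
    pvConsumeF (n + 1) (h :: t) d
      = pvConsumeF n (t.drop (pvRunLen h t).toNat) (pvTally d (1 + pvRunLen h t)) := by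
  have hk : pvRunLen h (h :: t) = 1 + pvRunLen h t := by simp [pvRunLen]
  have h0 := pvRunLen_nonneg h t
  have hnn : (1 + pvRunLen h t).toNat = (pvRunLen h t).toNat + 1 := by omega
  simp only [pvConsumeF, hk]
  rw [PySem.List.slice_from (h :: t) (a := 1 + pvRunLen h t) (by omega), hnn, List.drop_succ_cons]
  rfl

-- the result does not depend on the fuel, as long as it is at least the list length
lemma pvConsumeF_congr : ∀ (n m : Nat) (xs : List Int) (d : PySem.Dict Int Int),
    xs.length ≤ n → xs.length ≤ m → pvConsumeF n xs d = pvConsumeF m xs d := by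
  intro n
  induction n with
  | zero =>
    intro m xs d hn _
    have : xs = [] := by cases xs <;> simp_all
    subst this
    simp [pvConsumeF_nil]
  | succ n ih =>
    intro m xs d hn hm
    cases xs with
    | nil => simp [pvConsumeF_nil]
    | cons h t =>
      cases m with
      | zero => simp at hm
      | succ m =>
        rw [pvConsumeF_cons, pvConsumeF_cons]
        apply ih
        · have := @List.length_drop _ (pvRunLen h t).toNat t
          simp at hn; omega
        · have := @List.length_drop _ (pvRunLen h t).toNat t
          simp at hm; omega

-- A's fold with a pending run (cur, len) equals B's consumption after the run of cur is absorbed.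
lemma pvKey : ∀ (xs : List Int) (cur len : Int) (d : PySem.Dict Int Int),
    pvTally (xs.foldl pvStepA (d, cur, len)).1 (xs.foldl pvStepA (d, cur, len)).2.2
      = pvConsumeF (xs.drop (pvRunLen cur xs).toNat).length (xs.drop (pvRunLen cur xs).toNat)
          (pvTally d (len + pvRunLen cur xs)) := by
  intro xs
  induction xs with
  | nil =>
    intro cur len d
    simp [pvRunLen, pvConsumeF_nil]
  | cons a t ih =>
    intro cur len d
    by_cases hac : a = cur
    · subst hac
      simp only [List.foldl_cons, pvStepA, BEq.rfl, if_true]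
      rw [ih a (len + 1) d]
      have hk : pvRunLen a (a :: t) = 1 + pvRunLen a t := by simp [pvRunLen]
      have h0 := pvRunLen_nonneg a t
      have hnn : (1 + pvRunLen a t).toNat = (pvRunLen a t).toNat + 1 := by omega
      rw [hk, hnn, List.drop_succ_cons]
      ring_nf
    · have hb : (a == cur) = false := by simp [hac]
      simp only [List.foldl_cons, pvStepA, hb, Bool.false_eq_true, if_false, pvPush_eq]
      rw [ih a 1 (pvTally d len)]
      have hk0 : pvRunLen cur (a :: t) = 0 := by simp [pvRunLen, hac]
      rw [hk0]
      simp only [Int.toNat_zero, List.drop_zero, add_zero]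
      rw [List.length_cons, pvConsumeF_cons]
      apply pvConsumeF_congr
      · exact le_refl _
      · have := @List.length_drop _ (pvRunLen a t).toNat t
        omega

theorem count_rally_lengths_spec : Claim_equal_count_rally_lengths := by
  intro rallies _ hpre
  unfold Spec_count_rally_lengths
  match rallies, hpre with
  | r0 :: rest, _ =>
    unfold count_rally_lengths count_rally_lengths_alt
    have hget : PySem.List.pyGet? (r0 :: rest) 0 = some r0 := by
      simp [PySem.List.pyGet?, PySem.List.pyIdx?]
    rw [hget]
    simp only [List.foldl_cons]
    have hfirst : pvStepA (PySem.Dict.empty, r0, 0) r0 = (PySem.Dict.empty, r0, 1) := by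
      simp [pvStepA]
    rw [hfirst, pvPush_eq, pvKey rest r0 1 PySem.Dict.empty]
    rw [List.length_cons, pvConsumeF_cons]
    congr 1
    apply pvConsumeF_congr
    · exact le_refl _
    · have := @List.length_drop _ (pvRunLen r0 rest).toNat rest
      omega
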